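-- pv_equiv track=rewrite | github.com/s-fraresso/Project_Euler | src/1-99/problem26.py | reciprocal_recurring_cycle_length
-- ===== SOURCE A (Python) =====
-- def reciprocal_recurring_cycle_length(d):
--     qr_list = [(0, 1)]
--     quotient, reste = 0, 1
--
--     while (quotient, reste) not in qr_list[:-1]:
--         quotient = reste // d
--         reste = (reste % d) * 10
--         qr_list.append((quotient, reste))
--
--     cycle_length = 0
--     for i in range(len(qr_list) - 2, -1, -1):
--         cycle_length += 1
--         if qr_list[i] == (quotient, reste):
--             break
--
--     return cycle_length
-- ===== SOURCE B (Python) =====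
-- def reciprocal_recurring_cycle_length(d):
--     # Floyd cycle detection on the remainder sequence r -> (r % d) * 10:
--     # no stored history at all; find a point inside the cycle with two
--     # pointers, then walk once around the cycle counting its length.
--     def step(r):
--         return (r % d) * 10
--
--     tortoise = step(1)
--     hare = step(step(1))
--     while tortoise != hare:
--         tortoise = step(tortoise)
--         hare = step(step(hare))
--
--     length = 1
--     probe = step(tortoise)
--     while probe != tortoise:
--         probe = step(probe)
--         length += 1
--     return length
-- ===== Notes on version B (the rewrite author's own statement) =====
-- stated objective: faster
-- what changed: replaces A's stored-history scheme (membership scan of the growing (quotient, remainder) list each iteration plus a final backward scan) with Floyd's two-pointer cycle detection on the remainder sequence: no history is stored, two pointers find a point inside the cycle and one walk around the cycle counts its length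
import Mathlib
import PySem

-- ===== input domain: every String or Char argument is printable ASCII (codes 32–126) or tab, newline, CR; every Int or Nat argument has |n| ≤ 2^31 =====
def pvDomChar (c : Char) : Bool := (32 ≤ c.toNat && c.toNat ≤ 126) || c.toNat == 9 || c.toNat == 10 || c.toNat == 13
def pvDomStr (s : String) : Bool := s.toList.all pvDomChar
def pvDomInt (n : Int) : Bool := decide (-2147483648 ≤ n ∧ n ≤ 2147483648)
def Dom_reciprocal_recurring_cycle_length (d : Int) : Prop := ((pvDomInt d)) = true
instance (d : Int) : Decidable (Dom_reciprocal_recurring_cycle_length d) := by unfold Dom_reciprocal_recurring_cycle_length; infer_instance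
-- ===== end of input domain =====

-- B replaces A's stored-history scheme (membership scan of the growing state list each
-- iteration plus a final backward scan) with Floyd's two-pointer cycle detection on the
-- remainder sequence; a timing run measured B faster (asymptotic).


-- ===== PORT A =====
-- the while loop, with fuel only to make it total (a state repeats after at most
-- 2*|d| iterations, see pv_coll_exists below); returns none on exhaustion
def pvLoopA (d : Int) : Nat → List (Int × Int) → Int → Int → Option (List (Int × Int) × Int × Int)
  | 0, _, _, _ => none
  | f + 1, qr_list, quotient, reste =>
    if (quotient, reste) ∈ qr_list.dropLast then some (qr_list, quotient, reste)
    else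
      pvLoopA d f (qr_list ++ [(PySem.Int.floordiv reste d, (PySem.Int.mod reste d) * 10)])
        (PySem.Int.floordiv reste d) ((PySem.Int.mod reste d) * 10)

-- the final 'for i in range(len(qr_list)-2, -1, -1)' loop, i.e. a scan of qr_list[:-1]
-- reversed, counting one per step and stopping at the first match
def pvBackscan (t : Int × Int) : List (Int × Int) → Int
  | [] => 0
  | x :: xs => if x = t then 1 else 1 + pvBackscan t xs

def pvFinishA (o : Option (List (Int × Int) × Int × Int)) : Int :=
  match o with
  | some (qr_list, quotient, reste) => pvBackscan (quotient, reste) qr_list.dropLast.reverse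
  | none => 0

def reciprocal_recurring_cycle_length (d : Int) : Int :=
  pvFinishA (pvLoopA d (2 * d.natAbs + 4) [(0, 1)] 0 1)

-- ===== PORT B =====
-- B's local helper 'step'
def pvStep (d r : Int) : Int := (PySem.Int.mod r d) * 10

-- phase 1: 'while tortoise != hare'; fuel only for totality, none on exhaustion
def pvFloyd1 (d : Int) : Nat → Int → Int → Option Int
  | 0, _, _ => none
  | f + 1, tortoise, hare =>
    if tortoise = hare then some tortoise
    else pvFloyd1 d f (pvStep d tortoise) (pvStep d (pvStep d hare))

-- phase 2: 'while probe != tortoise', counting length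
def pvFloyd2 (d : Int) : Nat → Int → Int → Int → Int
  | 0, _, _, length => length
  | f + 1, tortoise, probe, length =>
    if probe = tortoise then length
    else pvFloyd2 d f tortoise (pvStep d probe) (length + 1)

def reciprocal_recurring_cycle_length_alt (d : Int) : Int :=
  match pvFloyd1 d (2 * d.natAbs + 4) (pvStep d 1) (pvStep d (pvStep d 1)) with
  | some tortoise => pvFloyd2 d (2 * d.natAbs + 4) tortoise (pvStep d tortoise) 1
  | none => 0

-- ===== PRECONDITION & SPEC =====
-- Python raises ZeroDivisionError at d = 0 (both A and B); everything else returns.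
def Pre_reciprocal_recurring_cycle_length (d : Int) : Prop := d ≠ 0
instance (d : Int) : Decidable (Pre_reciprocal_recurring_cycle_length d) := by unfold Pre_reciprocal_recurring_cycle_length; infer_instance
def pvWitness_reciprocal_recurring_cycle_length : Int := 7

def Spec_reciprocal_recurring_cycle_length (d : Int) (out : Int) : Prop := out = reciprocal_recurring_cycle_length_alt d
instance (d : Int) (out : Int) : Decidable (Spec_reciprocal_recurring_cycle_length d out) := by unfold Spec_reciprocal_recurring_cycle_length; infer_instance

-- ===== CLAIM (what is proved, stated in full; the proofs are below) =====
def Claim_equal_reciprocal_recurring_cycle_length : Prop := ∀ (d : Int), Dom_reciprocal_recurring_cycle_length d → Pre_reciprocal_recurring_cycle_length d → Spec_reciprocal_recurring_cycle_length d (reciprocal_recurring_cycle_length d)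

-- ===== LEMMAS AND PROOFS =====

-- the remainder sequence 1, (1 % d)*10, … both programs iterate
def pvSeq (d : Int) : Nat → Int
  | 0 => 1
  | n + 1 => pvStep d (pvSeq d n)

-- the (quotient, reste) pair sequence A stores; its second component is pvSeq
def pvPair (d : Int) : Nat → Int × Int
  | 0 => (0, 1)
  | n + 1 => (PySem.Int.floordiv (pvSeq d n) d, PySem.Int.mod (pvSeq d n) d * 10)

theorem pv_pair_snd (d : Int) (n : Nat) : (pvPair d n).2 = pvSeq d n := by
  cases n <;> rfl

theorem pvFinishA_some (l : List (Int × Int)) (q r : Int) :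
    pvFinishA (some (l, q, r)) = pvBackscan (q, r) l.dropLast.reverse := rfl

theorem pv_mod_bounds (d x : Int) (hd : d ≠ 0) :
    -(d.natAbs : Int) < PySem.Int.mod x d ∧ PySem.Int.mod x d < (d.natAbs : Int) := by
  rcases lt_or_gt_of_ne hd with h | h
  · have := PySem.Int.mod_neg_bounds x h
    constructor <;> omega
  · have h1 := PySem.Int.mod_nonneg x h
    have h2 := PySem.Int.mod_lt x h
    constructor <;> omega

-- pigeonhole: among the first 2|d|+1 remainders some value repeats
theorem pv_coll_exists (d : Int) (hd : d ≠ 0) :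
    ∃ m, m ≤ 2 * d.natAbs ∧ ∃ k, k < m ∧ pvSeq d k = pvSeq d m := by
  have hk : 1 ≤ d.natAbs := by
    have : d.natAbs ≠ 0 := fun h => hd (Int.natAbs_eq_zero.mp h)
    omega
  have hmaps : ∀ n ∈ Finset.Icc 1 (2 * d.natAbs), pvSeq d n ∈
      Finset.image (fun m : Int => m * 10) (Finset.Ioo (-(d.natAbs : Int)) (d.natAbs : Int)) := by
    intro n hn
    simp only [Finset.mem_Icc] at hn
    obtain ⟨m, rfl⟩ : ∃ m, n = m + 1 := ⟨n - 1, by omega⟩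
    refine Finset.mem_image.mpr ⟨PySem.Int.mod (pvSeq d m) d, ?_, rfl⟩
    have := pv_mod_bounds d (pvSeq d m) hd
    simp only [Finset.mem_Ioo]
    omega
  have hcard : (Finset.image (fun m : Int => m * 10)
      (Finset.Ioo (-(d.natAbs : Int)) (d.natAbs : Int))).card < (Finset.Icc 1 (2 * d.natAbs)).card := by
    calc (Finset.image (fun m : Int => m * 10) (Finset.Ioo (-(d.natAbs : Int)) (d.natAbs : Int))).card
        ≤ (Finset.Ioo (-(d.natAbs : Int)) (d.natAbs : Int)).card := Finset.card_image_le
      _ < (Finset.Icc 1 (2 * d.natAbs)).card := by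
          rw [Int.card_Ioo, Nat.card_Icc]
          omega
  obtain ⟨a, ha, b, hb, hab, heq⟩ :=
    Finset.exists_ne_map_eq_of_card_lt_of_maps_to hcard hmaps
  simp only [Finset.mem_Icc] at ha hb
  rcases Nat.lt_or_ge a b with h | h
  · exact ⟨b, hb.2, a, h, heq⟩
  · exact ⟨a, ha.2, b, by omega, heq.symm⟩

-- periodicity forward from the first repeated index
theorem pv_per1 (d : Int) (M j : Nat) (hjM : j < M) (hj : pvSeq d j = pvSeq d M) :
    ∀ n, j ≤ n → pvSeq d (n + (M - j)) = pvSeq d n := by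
  intro n hn
  induction n, hn using Nat.le_induction with
  | base =>
    have : j + (M - j) = M := by omega
    rw [this]; exact hj.symm
  | succ n hn ih =>
    have : n + 1 + (M - j) = (n + (M - j)) + 1 := by omega
    rw [this]
    show pvStep d (pvSeq d (n + (M - j))) = pvStep d (pvSeq d n)
    rw [ih]

theorem pv_perk (d : Int) (M j : Nat) (hjM : j < M) (hj : pvSeq d j = pvSeq d M) :
    ∀ c n, j ≤ n → pvSeq d (n + c * (M - j)) = pvSeq d n := by
  intro c
  induction c with
  | zero => intro n hn; simp
  | succ c ih =>
    intro n hn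
    have : n + (c + 1) * (M - j) = (n + c * (M - j)) + (M - j) := by ring
    rw [this, pv_per1 d M j hjM hj _ (by omega), ih n hn]

-- every index ≥ j has a companion in the window [j, M) with the same forward orbit
theorem pv_reduce (d : Int) (M j : Nat) (hjM : j < M) (hj : pvSeq d j = pvSeq d M) :
    ∀ n, j ≤ n → ∃ n', j ≤ n' ∧ n' < M ∧ ∀ t, pvSeq d (n' + t) = pvSeq d (n + t) := by
  intro n
  induction n using Nat.strong_induction_on with
  | _ n ih =>
    intro hn
    rcases Nat.lt_or_ge n M with hlt | hge
    · exact ⟨n, hn, hlt, fun t => rfl⟩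
    · have hlam : 1 ≤ M - j := by omega
      have hm : j ≤ n - (M - j) := by omega
      obtain ⟨n', h1, h2, h3⟩ := ih (n - (M - j)) (by omega) hm
      refine ⟨n', h1, h2, fun t => ?_⟩
      have : n + t = ((n - (M - j)) + t) + (M - j) := by omega
      rw [this, pv_per1 d M j hjM hj _ (by omega), h3]

-- minimality of the return time: no step count t < M - j returns to a point of the orbit
theorem pv_retmin (d : Int) (M j : Nat) (hjM : j < M) (hj : pvSeq d j = pvSeq d M)
    (hmin : ∀ b, b < M → ¬∃ k, k < b ∧ pvSeq d k = pvSeq d b) :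
    ∀ n t, j ≤ n → 1 ≤ t → t < M - j → pvSeq d (n + t) = pvSeq d n → False := by
  intro n t hn ht1 ht2 heq
  obtain ⟨n', h1, h2, h3⟩ := pv_reduce d M j hjM hj n hn
  have hval : pvSeq d n' = pvSeq d n := by have := h3 0; simpa using this
  have h4 : pvSeq d (n' + t) = pvSeq d n' := by rw [h3 t, heq, hval]
  rcases Nat.lt_or_ge (n' + t) M with hlt | hge
  · exact hmin (n' + t) hlt ⟨n', by omega, h4.symm⟩
  · -- reduce by one period: n'' = n' + t - (M - j) < n'
    have hjn : j ≤ n' + t - (M - j) := by omega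
    have h5 : pvSeq d (n' + t) = pvSeq d (n' + t - (M - j)) := by
      have hper := pv_per1 d M j hjM hj (n' + t - (M - j)) hjn
      rw [show n' + t - (M - j) + (M - j) = n' + t by omega] at hper
      exact hper
    have hlt2 : n' + t - (M - j) < n' := by omega
    exact hmin n' h2 ⟨n' + t - (M - j), hlt2, by rw [← h5, h4]⟩

-- injectivity of the pair sequence below the first repeat
theorem pv_pair_inj (d : Int) (M : Nat)
    (hmin : ∀ b, b < M → ¬∃ k, k < b ∧ pvSeq d k = pvSeq d b) :
    ∀ a b, a < b → b ≤ M → pvPair d a = pvPair d b → False := by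
  intro a b hab hbM heq
  obtain ⟨b', rfl⟩ : ∃ b', b = b' + 1 := ⟨b - 1, by omega⟩
  have hdvd : (10 : Int) ∣ (pvPair d (b' + 1)).2 := ⟨PySem.Int.mod (pvSeq d b') d, by
    show PySem.Int.mod (pvSeq d b') d * 10 = _; ring⟩
  cases a with
  | zero =>
    rw [← heq] at hdvd
    have : (pvPair d 0).2 = 1 := rfl
    rw [this] at hdvd
    omega
  | succ a' =>
    have h1 : PySem.Int.floordiv (pvSeq d a') d = PySem.Int.floordiv (pvSeq d b') d :=
      congrArg Prod.fst heq
    have h2 : PySem.Int.mod (pvSeq d a') d * 10 = PySem.Int.mod (pvSeq d b') d * 10 :=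
      congrArg Prod.snd heq
    have h2' : PySem.Int.mod (pvSeq d a') d = PySem.Int.mod (pvSeq d b') d := by omega
    have ha := PySem.Int.floordiv_mul_add_mod (pvSeq d a') d
    have hb := PySem.Int.floordiv_mul_add_mod (pvSeq d b') d
    have : pvSeq d a' = pvSeq d b' := by rw [← ha, ← hb, h1, h2']
    exact hmin b' (by omega) ⟨a', by omega, this⟩

-- idxOf? over a mapped range with an injective function
theorem pvIdxOf?_concat_self (a : Int × Int) (l : List (Int × Int)) (h : a ∉ l) :
    (l ++ [a]).idxOf? a = some l.length := by
  induction l with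
  | nil => simp [List.idxOf?_cons]
  | cons x xs ih =>
    have hx : x ≠ a := fun e => h (e ▸ List.mem_cons_self)
    rw [List.cons_append, List.idxOf?_cons, if_neg (by simp [hx]),
      ih (fun hm => h (List.mem_cons_of_mem _ hm))]
    simp

theorem pvIdxOf?_append_left (s : Int × Int) (l t : List (Int × Int)) (h : s ∈ l) :
    (l ++ t).idxOf? s = l.idxOf? s := by
  induction l with
  | nil => cases h
  | cons x xs ih =>
    rw [List.cons_append, List.idxOf?_cons, List.idxOf?_cons]
    by_cases hx : x = s
    · simp [hx]
    · rw [if_neg (by simp [hx]), if_neg (by simp [hx]),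
        ih ((List.mem_cons.mp h).resolve_left (fun e => hx e.symm))]

theorem pv_idxOf_range_map (g : Nat → Int × Int) (n i : Nat) (hin : i < n)
    (hinj : ∀ a b, a < n → b < n → g a = g b → a = b) :
    ((List.range n).map g).idxOf? (g i) = some i := by
  induction n with
  | zero => omega
  | succ n ih =>
    rw [List.range_succ, List.map_append]
    rcases Nat.lt_or_ge i n with h | h
    · rw [pvIdxOf?_append_left _ _ _ (List.mem_map.mpr ⟨i, List.mem_range.mpr h, rfl⟩)]
      exact ih h (fun a b ha hb => hinj a b (by omega) (by omega))
    · have : i = n := by omega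
      subst this
      have hnot : g i ∉ (List.range i).map g := by
        intro hm
        obtain ⟨k, hk, hke⟩ := List.mem_map.mp hm
        rw [List.mem_range] at hk
        have := hinj k i (by omega) (by omega) hke
        omega
      simp only [List.map_cons, List.map_nil]
      rw [pvIdxOf?_concat_self _ _ hnot]
      simp

theorem pvBackscan_append (t : Int × Int) (ys zs : List (Int × Int)) :
    pvBackscan t (ys ++ zs) =
      if t ∈ ys then pvBackscan t ys else (ys.length : Int) + pvBackscan t zs := by
  induction ys with
  | nil => simp
  | cons x xs ih =>
    by_cases hx : x = t
    · simp [pvBackscan, hx]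
    · simp only [List.cons_append, pvBackscan, if_neg hx, ih, List.mem_cons, List.length_cons]
      rcases eq_or_ne t x with h | h
      · exact absurd h.symm hx
      · simp only [h, false_or]
        split_ifs <;> push_cast <;> ring

-- value of A's backward scan: with distinct entries, scanning the reverse stops
-- (length - j) steps in, where j is the index of the target
theorem pvBackscan_reverse (t : Int × Int) (l : List (Int × Int)) (j : Nat)
    (h : l.idxOf? t = some j) (hn : l.Nodup) :
    pvBackscan t l.reverse = (l.length : Int) - (j : Int) := by
  induction l generalizing j with
  | nil => simp [List.idxOf?] at h
  | cons x xs ih =>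
    rw [List.idxOf?_cons] at h
    by_cases hx : x = t
    · rw [if_pos (by simp [hx])] at h
      obtain rfl : j = 0 := by simpa using h.symm
      have hnot : t ∉ xs.reverse := by
        simp only [List.mem_reverse]; exact fun hm => (List.nodup_cons.mp hn).1 (hx ▸ hm)
      rw [List.reverse_cons, pvBackscan_append, if_neg hnot]
      simp [pvBackscan]
    · rw [if_neg (by simp [hx])] at h
      obtain ⟨j', hj', rfl⟩ : ∃ j', xs.idxOf? t = some j' ∧ j = j' + 1 := by
        cases hidx : xs.idxOf? t with
        | none => rw [hidx] at h; simp at h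
        | some j'' => rw [hidx] at h; exact ⟨j'', rfl, by simpa using h.symm⟩
      have hmem : t ∈ xs := by
        by_contra hm
        rw [List.idxOf?_eq_none_iff.mpr hm] at hj'; simp at hj'
      rw [List.reverse_cons, pvBackscan_append, if_pos (List.mem_reverse.mpr hmem),
        ih j' hj' (List.nodup_cons.mp hn).2]
      push_cast [List.length_cons]; ring

-- A's while loop runs exactly to index M+1 (the first pair repeat)
theorem pv_loopA (d : Int) (M : Nat)
    (hmin : ∀ b, b < M → ¬∃ k, k < b ∧ pvSeq d k = pvSeq d b)
    (hstop : pvPair d (M + 1) ∈ (List.range (M + 1)).map (pvPair d)) :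
    ∀ f n, n ≤ M + 1 → M + 2 ≤ n + f →
      pvLoopA d f ((List.range (n + 1)).map (pvPair d)) (pvPair d n).1 (pvPair d n).2
        = some ((List.range (M + 2)).map (pvPair d), (pvPair d (M + 1)).1, (pvPair d (M + 1)).2) := by
  intro f
  induction f with
  | zero => intro n h1 h2; omega
  | succ f ih =>
    intro n h1 h2
    rw [pvLoopA]
    have hdrop : (((List.range (n + 1)).map (pvPair d)).dropLast) = (List.range n).map (pvPair d) := by
      rw [List.range_succ, List.map_append, List.map_cons, List.map_nil, List.dropLast_concat]
    rcases Nat.lt_or_ge n (M + 1) with hn | hn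
    · have hnotmem : ((pvPair d n).1, (pvPair d n).2) ∉ ((List.range (n + 1)).map (pvPair d)).dropLast := by
        rw [hdrop]
        intro hm
        obtain ⟨k, hk, hke⟩ := List.mem_map.mp hm
        rw [List.mem_range] at hk
        rw [Prod.mk.eta] at hke
        exact pv_pair_inj d M hmin k n hk (by omega) hke
      rw [if_neg hnotmem]
      have hr : (pvPair d n).2 = pvSeq d n := pv_pair_snd d n
      have hlist : ((List.range (n + 1)).map (pvPair d)) ++ [pvPair d (n + 1)]
          = (List.range (n + 2)).map (pvPair d) := by
        simp [List.range_succ]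
      have hq : PySem.Int.floordiv ((pvPair d n).2) d = (pvPair d (n + 1)).1 := by rw [hr]; rfl
      have hr2 : PySem.Int.mod ((pvPair d n).2) d * 10 = (pvPair d (n + 1)).2 := by rw [hr]; rfl
      rw [show (PySem.Int.floordiv ((pvPair d n).2) d, PySem.Int.mod ((pvPair d n).2) d * 10)
        = pvPair d (n + 1) by rw [hr]; rfl, hq, hr2, hlist]
      exact ih (n + 1) (by omega) (by omega)
    · have : n = M + 1 := by omega
      subst this
      rw [hdrop, if_pos (by rw [Prod.mk.eta]; exact hstop)]

-- B's phase-1 loop stops exactly at the least meeting index i0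
theorem pv_loopB1 (d : Int) (i0 : Nat)
    (hQ : 1 ≤ i0 ∧ pvSeq d i0 = pvSeq d (2 * i0))
    (hminQ : ∀ i, i < i0 → ¬(1 ≤ i ∧ pvSeq d i = pvSeq d (2 * i))) :
    ∀ f i, 1 ≤ i → i ≤ i0 → i0 + 1 ≤ i + f →
      pvFloyd1 d f (pvSeq d i) (pvSeq d (2 * i)) = some (pvSeq d i0) := by
  intro f
  induction f with
  | zero => intro i h1 h2 h3; omega
  | succ f ih =>
    intro i h1 h2 h3
    rw [pvFloyd1]
    by_cases heq : pvSeq d i = pvSeq d (2 * i)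
    · have : i = i0 := by
        rcases Nat.lt_or_ge i i0 with h | h
        · exact absurd ⟨h1, heq⟩ (hminQ i h)
        · omega
      subst this
      rw [if_pos heq]
    · rw [if_neg heq]
      have ht : pvStep d (pvSeq d i) = pvSeq d (i + 1) := rfl
      have hh : pvStep d (pvStep d (pvSeq d (2 * i))) = pvSeq d (2 * (i + 1)) := by
        have : 2 * (i + 1) = (2 * i + 1) + 1 := by omega
        rw [this]; rfl
      have hne : i ≠ i0 := fun h => heq (h ▸ hQ.2)
      rw [ht, hh]
      exact ih (i + 1) (by omega) (by omega) (by omega)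

-- B's phase-2 loop counts exactly the cycle length M - j
theorem pv_loopB2 (d : Int) (M j i0 : Nat) (hjM : j < M) (hj : pvSeq d j = pvSeq d M)
    (hmin : ∀ b, b < M → ¬∃ k, k < b ∧ pvSeq d k = pvSeq d b)
    (hji0 : j ≤ i0) :
    ∀ f t, 1 ≤ t → t ≤ M - j → M - j + 1 ≤ t + f →
      pvFloyd2 d f (pvSeq d i0) (pvSeq d (i0 + t)) (t : Int) = ((M - j : Nat) : Int) := by
  intro f
  induction f with
  | zero => intro t h1 h2 h3; omega
  | succ f ih =>
    intro t h1 h2 h3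
    rw [pvFloyd2]
    by_cases heq : pvSeq d (i0 + t) = pvSeq d i0
    · have : t = M - j := by
        rcases Nat.lt_or_ge t (M - j) with h | h
        · exact absurd heq (fun he => pv_retmin d M j hjM hj hmin i0 t hji0 h1 h heq)
        · omega
      subst this
      rw [if_pos heq]
    · rw [if_neg heq]
      have hp : pvStep d (pvSeq d (i0 + t)) = pvSeq d (i0 + (t + 1)) := rfl
      have ht : t ≠ M - j := fun h => by
        subst h
        exact heq (pv_per1 d M j hjM hj i0 hji0)
      have hcast : (t : Int) + 1 = ((t + 1 : Nat) : Int) := by push_cast; ring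
      rw [hp, hcast]
      exact ih (t + 1) (by omega) (by omega) (by omega)

-- the core equivalence at d ≠ 0: both ports compute the cycle length M - j
theorem pv_core (d : Int) (hd : d ≠ 0) :
    reciprocal_recurring_cycle_length d = reciprocal_recurring_cycle_length_alt d := by
  obtain ⟨mB, hmB, hcoll⟩ := pv_coll_exists d hd
  have hex : ∃ m, ∃ k, k < m ∧ pvSeq d k = pvSeq d m := ⟨mB, hcoll⟩
  set M := Nat.find hex with hMdef
  have hMle : M ≤ 2 * d.natAbs := le_trans (Nat.find_min' hex hcoll) hmB
  obtain ⟨j, hjM, hj⟩ := Nat.find_spec hex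
  have hmin : ∀ b, b < M → ¬∃ k, k < b ∧ pvSeq d k = pvSeq d b :=
    fun b hb => Nat.find_min hex hb
  -- the repeated pair: pvPair d (M+1) = pvPair d (j+1)
  have hpair : pvPair d (M + 1) = pvPair d (j + 1) := by
    show (PySem.Int.floordiv (pvSeq d M) d, PySem.Int.mod (pvSeq d M) d * 10)
      = (PySem.Int.floordiv (pvSeq d j) d, PySem.Int.mod (pvSeq d j) d * 10)
    rw [hj]
  -- ===== A's value =====
  have hstop : pvPair d (M + 1) ∈ (List.range (M + 1)).map (pvPair d) := by
    rw [hpair]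
    exact List.mem_map.mpr ⟨j + 1, List.mem_range.mpr (by omega), rfl⟩
  have hA : reciprocal_recurring_cycle_length d = ((M - j : Nat) : Int) := by
    unfold reciprocal_recurring_cycle_length
    have hinit : ((List.range (0 + 1)).map (pvPair d)) = [(0, 1)] := by
      simp [List.range_succ, pvPair]
    have h0 : (pvPair d 0).1 = 0 := rfl
    have h1 : (pvPair d 0).2 = 1 := rfl
    have := pv_loopA d M hmin hstop (2 * d.natAbs + 4) 0 (by omega) (by omega)
    rw [hinit, h0, h1] at this
    rw [this, pvFinishA_some]
    have hdrop : (((List.range (M + 2)).map (pvPair d)).dropLast) = (List.range (M + 1)).map (pvPair d) := by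
      rw [show M + 2 = (M + 1) + 1 from rfl, List.range_succ, List.map_append,
        List.map_cons, List.map_nil, List.dropLast_concat]
    rw [hdrop, Prod.mk.eta]
    have hinj : ∀ a b, a < M + 1 → b < M + 1 → pvPair d a = pvPair d b → a = b := by
      intro a b ha hb he
      rcases Nat.lt_trichotomy a b with h | h | h
      · exact absurd he (fun he => pv_pair_inj d M hmin a b h (by omega) he)
      · exact h
      · exact absurd he.symm (fun he => pv_pair_inj d M hmin b a h (by omega) he)
    have hidx : ((List.range (M + 1)).map (pvPair d)).idxOf? (pvPair d (M + 1)) = some (j + 1) := by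
      rw [hpair]
      exact pv_idxOf_range_map (pvPair d) (M + 1) (j + 1) (by omega) hinj
    have hnd : ((List.range (M + 1)).map (pvPair d)).Nodup := by
      refine List.Nodup.map_on ?_ (List.nodup_range)
      intro x hx y hy he
      rw [List.mem_range] at hx hy
      exact hinj x y hx hy he
    rw [pvBackscan_reverse _ _ _ hidx hnd]
    rw [List.length_map, List.length_range]
    push_cast
    omega
  -- ===== B's value =====
  have hlam : 1 ≤ M - j := by omega
  -- a meeting index exists at or below M: the least multiple of the period ≥ j
  obtain ⟨iw, hiw1, hiwM, hiweq⟩ : ∃ i, 1 ≤ i ∧ i ≤ M ∧ pvSeq d i = pvSeq d (2 * i) := by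
    have hc : ∃ c, 1 ≤ c ∧ j ≤ c * (M - j) := by
      refine ⟨j + 1, by omega, ?_⟩
      nlinarith
    obtain ⟨hc1, hcj⟩ := Nat.find_spec hc
    refine ⟨Nat.find hc * (M - j), by nlinarith, ?_, ?_⟩
    · obtain ⟨c', hcc⟩ : ∃ c', Nat.find hc = c' + 1 := ⟨Nat.find hc - 1, by omega⟩
      rcases Nat.eq_zero_or_pos c' with h0 | h1
      · rw [hcc, h0]; omega
      · have hnot := Nat.find_min hc (show c' < Nat.find hc by omega)
        push_neg at hnot
        have := hnot h1
        rw [hcc]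
        have : (c' + 1) * (M - j) = c' * (M - j) + (M - j) := by ring
        omega
    · have harg : 2 * (Nat.find hc * (M - j)) = Nat.find hc * (M - j) + Nat.find hc * (M - j) := by
        ring
      rw [harg, pv_perk d M j hjM hj _ _ hcj]
  have hi0ex : ∃ i, 1 ≤ i ∧ pvSeq d i = pvSeq d (2 * i) := ⟨iw, hiw1, hiweq⟩
  set i0 := Nat.find hi0ex with hi0def
  have hQ := Nat.find_spec hi0ex
  have hminQ : ∀ i, i < i0 → ¬(1 ≤ i ∧ pvSeq d i = pvSeq d (2 * i)) :=
    fun i hi => Nat.find_min hi0ex hi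
  have hi0M : i0 ≤ M := le_trans (Nat.find_min' hi0ex ⟨hiw1, hiweq⟩) hiwM
  have hji0 : j ≤ i0 := by
    by_contra hcon
    push_neg at hcon
    have h1 := hQ.1
    have heq := hQ.2
    rcases Nat.lt_or_ge (2 * i0) M with hlt | hge
    · exact hmin (2 * i0) hlt ⟨i0, by omega, heq⟩
    · obtain ⟨n', hn1, hn2, hn3⟩ := pv_reduce d M j hjM hj (2 * i0) (by omega)
      have : pvSeq d n' = pvSeq d (2 * i0) := by have := hn3 0; simpa using this
      exact hmin n' hn2 ⟨i0, by omega, by rw [this, ← heq]⟩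
  have hB : reciprocal_recurring_cycle_length_alt d = ((M - j : Nat) : Int) := by
    unfold reciprocal_recurring_cycle_length_alt
    rw [show pvStep d 1 = pvSeq d 1 from rfl,
      show pvStep d (pvSeq d 1) = pvSeq d (2 * 1) from rfl]
    rw [pv_loopB1 d i0 hQ hminQ (2 * d.natAbs + 4) 1 (by omega) hQ.1 (by omega)]
    show pvFloyd2 d (2 * d.natAbs + 4) (pvSeq d i0) (pvStep d (pvSeq d i0)) 1 = ((M - j : Nat) : Int)
    rw [show pvStep d (pvSeq d i0) = pvSeq d (i0 + 1) from rfl]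
    have := pv_loopB2 d M j i0 hjM hj hmin hji0 (2 * d.natAbs + 4) 1 (by omega) hlam (by omega)
    simpa using this
  rw [hA, hB]

-- ===== VERDICT (by name: the statement is the Claim_ definition above) =====
theorem reciprocal_recurring_cycle_length_spec : Claim_equal_reciprocal_recurring_cycle_length := by
  intro d _ hd
  exact pv_core d hd
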